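-- pv_equiv track=rewrite | github.com/HYEZ/Algorithms | 프로그래머스/땅따먹기.py | solution
-- ===== SOURCE A (Python) =====
-- def solution(land):
--     n, m = len(land), len(land[0])
--     dp = [[0] * m for _ in range(n)]
--     dp[0] = land[0]
--     for i in range(1, n):
--         for j in range(m):
--             dp[i][j] = land[i][j] + max(dp[i-1][0:j] + dp[i-1][j+1:m])
--
--     return max(dp[-1])
-- ===== SOURCE B (Python) =====
-- def solution(land):
--     m = len(land[0])
--     best, bidx, second = land[0][0], 0, None
--     for j in range(1, m):
--         v = land[0][j]
--         if v > best:
--             best, bidx, second = v, j, best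
--         elif second is None or v > second:
--             second = v
--     for row in land[1:]:
--         nb, nbi, ns = None, -1, None
--         for j in range(m):
--             v = row[j] + (second if j == bidx else best)
--             if nb is None or v > nb:
--                 nb, nbi, ns = v, j, nb
--             elif ns is None or v > ns:
--                 ns = v
--         best, bidx, second = nb, nbi, ns
--     return best
-- ===== Notes on version B (the rewrite author's own statement) =====
-- stated objective: faster
-- what changed: A rebuilds the maximum of the previous DP row with the j-th column removed by slicing and scanning the row for every cell (O(m) per cell); B keeps only the previous row's best value, its column index, and the best value at any other column, so each cell is computed in O(1) in a single pass per row.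
-- outside the precondition, e.g. on solution([[1], [2]]): A raises ValueError, B raises TypeError; on solution([[]]): A raises ValueError, B raises IndexError; on solution([[1, 2], [3]]): A raises IndexError, B raises IndexError
import Mathlib
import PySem

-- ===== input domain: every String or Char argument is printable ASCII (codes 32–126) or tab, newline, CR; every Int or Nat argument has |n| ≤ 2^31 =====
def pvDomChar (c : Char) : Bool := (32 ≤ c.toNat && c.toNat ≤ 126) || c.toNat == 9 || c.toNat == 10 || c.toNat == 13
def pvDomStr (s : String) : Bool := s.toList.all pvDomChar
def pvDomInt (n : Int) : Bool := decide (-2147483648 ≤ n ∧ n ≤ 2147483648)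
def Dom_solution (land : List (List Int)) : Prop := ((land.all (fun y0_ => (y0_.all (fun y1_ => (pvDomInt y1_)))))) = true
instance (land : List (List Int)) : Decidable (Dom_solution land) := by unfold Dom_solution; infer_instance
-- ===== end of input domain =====

-- B replaces A's per-cell rescan of the previous DP row (max over m-1 slices per cell)
-- by tracking only the top value, its column, and the best value at any other column of
-- the previous row: O(n*m) instead of O(n*m^2).

-- ===== PORT A =====
-- A-side helpers: the literal bodies of A's two nested loops (one def per Python loop body)
def aInner (land : List (List Int)) (m : Int) (i : Int) (dp : List (List Int)) (j : Int) :
    List (List Int) :=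
  let v : Int := PySem.List.pyGetD (PySem.List.pyGetD land i []) j 0 +
    (PySem.List.max? (PySem.List.slice (PySem.List.pyGetD dp (i - 1) []) (some 0) (some j) ++
                      PySem.List.slice (PySem.List.pyGetD dp (i - 1) []) (some (j + 1)) (some m))
      id).getD 0
  PySem.List.pySetD dp i (PySem.List.pySetD (PySem.List.pyGetD dp i []) j v)

def aOuter (land : List (List Int)) (m : Int) (dp : List (List Int)) (i : Int) :
    List (List Int) :=
  (PySem.List.pyRange 0 m 1).foldl (aInner land m i) dp

def solution (land : List (List Int)) : Int :=
  let n : Int := PySem.List.len land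
  let m : Int := PySem.List.len ((PySem.List.pyGet? land 0).getD [])
  let dp : List (List Int) := (PySem.List.pyRange 0 n 1).map (fun _ => List.replicate m.toNat 0)
  let dp := PySem.List.pySetD dp 0 ((PySem.List.pyGet? land 0).getD [])
  let dp := (PySem.List.pyRange 1 n 1).foldl (aOuter land m) dp
  (PySem.List.max? (PySem.List.pyGetD dp (-1) []) id).getD 0

-- ===== PORT B =====
-- B-side helpers: the literal bodies of B's three loops (one def per Python loop body)
def altFirst (row0 : List Int) (st : Int × Int × Option Int) (j : Int) : Int × Int × Option Int :=
  let v := PySem.List.pyGetD row0 j 0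
  if st.1 < v then (v, j, some st.1)
  else match st.2.2 with
    | none => (st.1, st.2.1, some v)
    | some s => if s < v then (st.1, st.2.1, some v) else st

def altInner (st : Int × Int × Option Int) (row : List Int)
    (t : Option Int × Int × Option Int) (j : Int) : Option Int × Int × Option Int :=
  let v := PySem.List.pyGetD row j 0 + (if j = st.2.1 then st.2.2.getD 0 else st.1)
  match t.1 with
  | none => (some v, j, t.1)
  | some b =>
    if b < v then (some v, j, t.1)
    else match t.2.2 with
      | none => (t.1, t.2.1, some v)
      | some s => if s < v then (t.1, t.2.1, some v) else t

def altOuter (m : Int) (st : Int × Int × Option Int) (row : List Int) : Int × Int × Option Int :=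
  let t := (PySem.List.pyRange 0 m 1).foldl (altInner st row) (none, -1, none)
  (t.1.getD 0, t.2.1, t.2.2)

def solution_alt (land : List (List Int)) : Int :=
  let m : Int := PySem.List.len ((PySem.List.pyGet? land 0).getD [])
  let row0 : List Int := (PySem.List.pyGet? land 0).getD []
  let st : Int × Int × Option Int := (PySem.List.pyGetD row0 0 0, 0, none)
  let st := (PySem.List.pyRange 1 m 1).foldl (altFirst row0) st
  let st := (PySem.List.slice land (some 1) none).foldl (altOuter m) st
  st.1

-- ===== PRECONDITION & SPEC =====
-- Pre_ excludes exactly the inputs where the Python A raises: empty land (IndexError),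
-- an empty first row or a single-column grid with several rows (ValueError: max of an
-- empty sequence), and grids whose later rows are shorter than the first (IndexError).
def Pre_solution (land : List (List Int)) : Prop :=
  land ≠ [] ∧ 1 ≤ (land.headD []).length ∧
  (∀ r ∈ land, (land.headD []).length ≤ r.length) ∧
  (2 ≤ land.length → 2 ≤ (land.headD []).length)
instance (land : List (List Int)) : Decidable (Pre_solution land) := by
  unfold Pre_solution; infer_instance
def pvWitness_solution : List (List Int) := [[1, 2, 3], [3, 2, 1], [0, 5, 0]]
def Spec_solution (land : List (List Int)) (out : Int) : Prop := out = solution_alt land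
instance (land : List (List Int)) (out : Int) : Decidable (Spec_solution land out) := by unfold Spec_solution; infer_instance

-- ===== CLAIM (what is proved, stated in full; the proofs are below) =====
def Claim_equal_solution : Prop := ∀ (land : List (List Int)), Dom_solution land → Pre_solution land → Spec_solution land (solution land)

-- ===== LEMMAS AND PROOFS =====

-- the value A adds at column j: best of the previous row with column j removed
def exclMax (prev : List Int) (j : Nat) : Int := ((prev.take j ++ prev.drop (j + 1)).max?).getD 0

def stepRow (m : Nat) (prev row : List Int) : List Int :=
  (List.range m).map (fun j => row.getD j 0 + exclMax prev j)

def finalRow (m : Nat) (land : List (List Int)) : List Int :=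
  (land.drop 1).foldl (fun prev row => stepRow m prev row) (land.getD 0 [])

-- the abstract top-2 update both of B's loops perform
def upd (st : Int × Int × Option Int) (v j : Int) : Int × Int × Option Int :=
  if st.1 < v then (v, j, some st.1)
  else (st.1, st.2.1,
    match st.2.2 with
    | none => some v
    | some s => if s < v then some v else some s)

-- the top-2 summary st is correct for the row vals
def Good (vals : List Int) (st : Int × Int × Option Int) : Prop :=
  ∃ k : Nat, st.2.1 = (k : Int) ∧ k < vals.length ∧ vals.getD k 0 = st.1 ∧
    (∀ x ∈ vals, x ≤ st.1) ∧ st.2.2 = (vals.take k ++ vals.drop (k + 1)).max?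

theorem pymax_eq (xs : List Int) : PySem.List.max? xs id = xs.max? := by
  rcases hx : PySem.List.max? xs id with _ | p
  · rw [(PySem.List.max?_eq_none_iff xs id).mp hx]
    simp
  · have hp := PySem.List.max?_mem hx
    have hmax := PySem.List.max?_isMax hx
    exact (List.max?_eq_some_iff.mpr ⟨hp, fun b hb => hmax b hb⟩).symm

theorem good_value (vals : List Int) (st : Int × Int × Option Int) (h : Good vals st) :
    st.1 = vals.max?.getD 0 := by
  obtain ⟨k, hbi, hk, hget, hub, hs⟩ := h
  have hmem : st.1 ∈ vals := by
    rw [← hget, List.getD_eq_getElem vals 0 hk]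
    exact List.getElem_mem hk
  rw [List.max?_eq_some_iff.mpr ⟨hmem, hub⟩]
  rfl

theorem good_use (vals : List Int) (st : Int × Int × Option Int) (m : Nat)
    (h : Good vals st) (hlen : vals.length = m) (j : Nat) (hj : j < m) :
    (if (j : Int) = st.2.1 then st.2.2.getD 0 else st.1) = exclMax vals j := by
  obtain ⟨k, hbi, hk, hget, hub, hs⟩ := h
  rw [hbi, hs]
  by_cases hjk : j = k
  · subst hjk
    simp [exclMax]
  · have hne : ((j : Int) = (k : Int)) = False := by
      simp [Int.natCast_inj]; omega
    rw [if_neg (by simp [Int.natCast_inj]; omega)]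
    have hkv : vals.getD k 0 = vals[k] := List.getD_eq_getElem vals 0 hk
    have hmem : st.1 ∈ vals.take j ++ vals.drop (j + 1) := by
      rcases Nat.lt_or_ge k j with hlt | hge
      · apply List.mem_append_left
        have hkt : k < (vals.take j).length := by
          simp [List.length_take]; omega
        have hgt : (vals.take j)[k] = vals[k] := List.getElem_take
        rw [← hget, hkv, ← hgt]
        exact List.getElem_mem hkt
      · apply List.mem_append_right
        have hkd : k - (j + 1) < (vals.drop (j + 1)).length := by
          simp [List.length_drop]; omega
        have hgd : (vals.drop (j + 1))[k - (j+1)] = vals[(j+1) + (k - (j+1))] := List.getElem_drop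
        have hidx : (j+1) + (k - (j+1)) = k := by omega
        rw [← hget, hkv]
        rw [show vals[k] = vals[(j+1) + (k - (j+1))]'(by omega) from by simp [hidx]]
        rw [← hgd]
        exact List.getElem_mem hkd
    have hub' : ∀ x ∈ vals.take j ++ vals.drop (j + 1), x ≤ st.1 := by
      intro x hx
      rcases List.mem_append.mp hx with hx | hx
      · exact hub x (List.mem_of_mem_take hx)
      · exact hub x (List.mem_of_mem_drop hx)
    rw [exclMax, List.max?_eq_some_iff.mpr ⟨hmem, hub'⟩]
    rfl

theorem good_extend (vals : List Int) (st : Int × Int × Option Int) (v : Int)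
    (h : Good vals st) : Good (vals ++ [v]) (upd st v (vals.length : Int)) := by
  obtain ⟨k, hbi, hk, hget, hub, hs⟩ := h
  have hmem : st.1 ∈ vals := by
    rw [← hget, List.getD_eq_getElem vals 0 hk]; exact List.getElem_mem hk
  unfold upd
  by_cases hlt : st.1 < v
  · rw [if_pos hlt]
    refine ⟨vals.length, rfl, by simp, ?_, ?_, ?_⟩
    · rw [List.getD_eq_getElem _ 0 (by simp)]
      simp
    · intro x hx
      rcases List.mem_append.mp hx with hx | hx
      · exact le_of_lt (lt_of_le_of_lt (hub x hx) hlt)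
      · simp at hx; omega
    · have h1 : (vals ++ [v]).take vals.length = vals := by simp
      have h2 : (vals ++ [v]).drop (vals.length + 1) = [] := by
        simp [List.drop_append_of_le_length]
      rw [h1, h2, List.append_nil]
      exact (List.max?_eq_some_iff.mpr ⟨hmem, hub⟩).symm
  · rw [if_neg hlt]
    have hvle : v ≤ st.1 := le_of_not_gt hlt
    refine ⟨k, hbi, by simp; omega, ?_, ?_, ?_⟩
    · rw [List.getD_eq_getElem _ 0 (by simp; all_goals omega), List.getElem_append_left hk]
      rw [← List.getD_eq_getElem vals 0 hk]
      exact hget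
    · intro x hx
      rcases List.mem_append.mp hx with hx | hx
      · exact hub x hx
      · simp at hx; omega
    · have h1 : (vals ++ [v]).take k = vals.take k := List.take_append_of_le_length (by omega)
      have h2 : (vals ++ [v]).drop (k + 1) = vals.drop (k + 1) ++ [v] :=
        List.drop_append_of_le_length (by omega)
      rw [h1, h2, ← List.append_assoc]
      rcases hso : st.2.2 with _ | s0
      · rw [hso] at hs
        have : vals.take k ++ vals.drop (k+1) = [] := List.max?_eq_none_iff.mp hs.symm
        rw [this]
        simp
      · rw [hso] at hs
        have hs0mem := (List.max?_eq_some_iff.mp hs.symm).1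
        have hs0ub := (List.max?_eq_some_iff.mp hs.symm).2
        have hred : (st.1, st.2.1,
            match some s0 with
            | none => some v
            | some s => if s < v then some v else some s).2.2
            = if s0 < v then some v else some s0 := rfl
        rw [hred]
        by_cases hsv : s0 < v
        · rw [if_pos hsv]
          refine (List.max?_eq_some_iff.mpr ⟨by simp, ?_⟩).symm
          intro b hb
          rcases List.mem_append.mp hb with hb | hb
          · exact le_of_lt (lt_of_le_of_lt (hs0ub b hb) hsv)
          · simp at hb; omega
        · rw [if_neg hsv]
          refine (List.max?_eq_some_iff.mpr ⟨List.mem_append_left _ hs0mem, ?_⟩).symm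
          intro b hb
          rcases List.mem_append.mp hb with hb | hb
          · exact hs0ub b hb
          · simp at hb; omega

theorem fold_good (f : Int → Int) :
    ∀ (k : Nat) (s : Int), 0 ≤ s → ∀ st, Good ((PySem.List.pyRange 0 s 1).map f) st →
      Good ((PySem.List.pyRange 0 (s + k) 1).map f)
        ((PySem.List.pyRange s (s + k) 1).foldl (fun st j => upd st (f j) j) st) := by
  intro k
  induction k with
  | zero =>
    intro s hs st hg
    simp only [Nat.cast_zero, add_zero]
    rw [show PySem.List.pyRange s s 1 = [] from PySem.List.pyRange_one_eq_nil le_rfl]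
    simpa using hg
  | succ k ih =>
    intro s hs st hg
    have hb : s + ((k + 1 : Nat) : Int) = (s + 1) + (k : Nat) := by push_cast; ring
    rw [hb]
    have hcons : PySem.List.pyRange s ((s + 1) + (k : Nat)) 1
        = s :: PySem.List.pyRange (s + 1) ((s + 1) + (k : Nat)) 1 :=
      PySem.List.pyRange_one_cons (by push_cast; omega)
    rw [hcons, List.foldl_cons]
    apply ih (s + 1) (by omega)
    have hlen : (((PySem.List.pyRange 0 s 1).map f).length : Int) = s := by
      simp [PySem.List.length_pyRange_one]; omega
    have hext := good_extend _ st (f s) hg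
    rw [hlen] at hext
    rw [PySem.List.pyRange_one_succ_right (by omega), List.map_append]
    simpa using hext


def rowsA (m : Nat) (land : List (List Int)) (i : Nat) : List Int := finalRow m (land.take (i + 1))

theorem stepRow_length (m : Nat) (p r : List Int) : (stepRow m p r).length = m := by
  simp [stepRow]

theorem foldl_stepRow_length (m : Nat) (l : List (List Int)) (init : List Int)
    (h : init.length = m) : (l.foldl (fun p r => stepRow m p r) init).length = m := by
  induction l generalizing init with
  | nil => simpa using h
  | cons r l ih => exact ih _ (stepRow_length m init r)

theorem getD_zero_take (land : List (List Int)) (i : Nat) :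
    (land.take (i + 1)).getD 0 [] = land.getD 0 [] := by
  cases land <;> simp

theorem rowsA_length (m : Nat) (land : List (List Int))
    (h : (land.getD 0 []).length = m) (i : Nat) : (rowsA m land i).length = m :=
  foldl_stepRow_length m _ _ (by rw [getD_zero_take]; exact h)

theorem rowsA_zero (m : Nat) (land : List (List Int)) : rowsA m land 0 = land.getD 0 [] := by
  cases land <;> simp [rowsA, finalRow]

theorem rowsA_succ (m : Nat) (land : List (List Int)) (i : Nat) (h : i + 1 < land.length) :
    rowsA m land (i + 1) = stepRow m (rowsA m land i) (land.getD (i + 1) []) := by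
  cases land with
  | nil => simp at h
  | cons a l =>
    have hi : i < l.length := by simp at h; omega
    have h3 : l.take (i + 1) = l.take i ++ [l[i]] := by
      rw [List.take_succ, List.getElem?_eq_getElem hi]; rfl
    simp only [rowsA, finalRow, List.take_succ_cons, List.drop_succ_cons, List.drop_zero,
      List.getD_cons_zero, List.getD_cons_succ, h3, List.foldl_concat]
    congr 1
    exact (List.getD_eq_getElem l [] hi).symm

theorem finalRow_eq_rowsA (m : Nat) (land : List (List Int)) (hne : land ≠ []) :
    finalRow m land = rowsA m land (land.length - 1) := by
  unfold rowsA
  rw [Nat.sub_add_cancel (by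
    cases land with
    | nil => exact absurd rfl hne
    | cons a l => exact Nat.succ_le_succ (Nat.zero_le _)), List.take_length]

def gOf (st : Int × Int × Option Int) (row : List Int) (j : Int) : Int :=
  PySem.List.pyGetD row j 0 + (if j = st.2.1 then st.2.2.getD 0 else st.1)

theorem B1 (row0 : List Int) (m : Nat) (hm : row0.length = m) (hm1 : 1 ≤ m) :
    Good row0 ((PySem.List.pyRange 1 (m : Int) 1).foldl (altFirst row0)
      (PySem.List.pyGetD row0 0 0, 0, none)) := by
  have hbody : altFirst row0 = fun st j => upd st (PySem.List.pyGetD row0 j 0) j := by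
    funext st j
    unfold altFirst upd
    rcases st with ⟨b, bi, _ | s⟩ <;> dsimp <;> split_ifs <;> rfl
  rw [hbody]
  have hinit : Good ((PySem.List.pyRange 0 1 1).map (fun j => PySem.List.pyGetD row0 j 0))
      (PySem.List.pyGetD row0 0 0, 0, none) := by
    rw [show PySem.List.pyRange 0 1 1 = [0] from rfl]
    exact ⟨0, by simp, by simp, by simp, by simp, by simp⟩
  have hfg := fold_good (fun j => PySem.List.pyGetD row0 j 0) (m - 1) 1 (by omega) _ hinit
  rw [show (1 : Int) + ((m - 1 : Nat) : Int) = (m : Int) from by push_cast; omega] at hfg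
  rw [show (m : Int) = PySem.List.len row0 from by simp [hm]] at hfg ⊢
  rwa [PySem.List.map_pyGetD_pyRange_zero] at hfg

theorem embed_fold (st₀ : Int × Int × Option Int) (row : List Int) (L : List Int) :
    ∀ (b p : Int) (q : Option Int),
    L.foldl (altInner st₀ row) (some b, p, q)
    = (some (L.foldl (fun st j => upd st (gOf st₀ row j) j) (b, p, q)).1,
       (L.foldl (fun st j => upd st (gOf st₀ row j) j) (b, p, q)).2.1,
       (L.foldl (fun st j => upd st (gOf st₀ row j) j) (b, p, q)).2.2) := by
  induction L with
  | nil => intro b p q; rfl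
  | cons x L ih =>
    intro b p q
    rw [List.foldl_cons, List.foldl_cons]
    have hstep : altInner st₀ row (some b, p, q) x
        = (some (upd (b, p, q) (gOf st₀ row x) x).1, (upd (b, p, q) (gOf st₀ row x) x).2.1,
           (upd (b, p, q) (gOf st₀ row x) x).2.2) := by
      unfold altInner upd gOf
      dsimp
      cases q <;> dsimp <;> split_ifs <;> rfl
    rw [hstep]
    rcases hupd : upd (b, p, q) (gOf st₀ row x) x with ⟨b1, p1, q1⟩
    exact ih b1 p1 q1

theorem B2 (row prev : List Int) (st : Int × Int × Option Int) (m : Nat)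
    (hg : Good prev st) (hlen : prev.length = m) (hm1 : 1 ≤ m) :
    Good (stepRow m prev row) (altOuter (m : Int) st row) := by
  unfold altOuter
  have hcons : PySem.List.pyRange 0 (m : Int) 1 = 0 :: PySem.List.pyRange 1 (m : Int) 1 := by
    rw [PySem.List.pyRange_one_cons (by exact_mod_cast hm1)]
    norm_num
  rw [hcons, List.foldl_cons]
  have h0 : altInner st row (none, -1, none) 0 = (some (gOf st row 0), (0 : Int), (none : Option Int)) := by
    unfold altInner gOf
    rfl
  rw [h0, embed_fold st row (PySem.List.pyRange 1 (m : Int) 1)]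
  have hinit : Good ((PySem.List.pyRange 0 1 1).map (gOf st row)) (gOf st row 0, 0, none) := by
    rw [show PySem.List.pyRange 0 1 1 = [0] from rfl]
    exact ⟨0, by simp, by simp, by simp, by simp, by simp⟩
  have hfg := fold_good (gOf st row) (m - 1) 1 (by omega) _ hinit
  rw [show (1 : Int) + ((m - 1 : Nat) : Int) = (m : Int) from by push_cast; omega] at hfg
  have hvals : (PySem.List.pyRange 0 (m : Int) 1).map (gOf st row) = stepRow m prev row := by
    rw [PySem.List.pyRange_zero_natCast, List.map_map]
    unfold stepRow
    apply List.map_congr_left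
    intro j hj
    have hjm : j < m := List.mem_range.mp hj
    show gOf st row (j : Int) = row.getD j 0 + exclMax prev j
    unfold gOf
    rw [PySem.List.pyGetD_natCast]
    congr 1
    exact good_use prev st m hg hlen j hjm
  rw [hvals] at hfg
  exact hfg

theorem B3 (m : Nat) (hm1 : 1 ≤ m) (rest : List (List Int)) :
    ∀ (prev : List Int) (st : Int × Int × Option Int),
      Good prev st → prev.length = m →
      Good (rest.foldl (fun p r => stepRow m p r) prev)
        (rest.foldl (altOuter (m : Int)) st) := by
  induction rest with
  | nil => intro prev st hg _; simpa using hg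
  | cons r rest ih =>
    intro prev st hg hlen
    rw [List.foldl_cons, List.foldl_cons]
    exact ih _ _ (B2 r prev st m hg hlen hm1) (stepRow_length m prev r)

theorem B_chars (land : List (List Int)) (m : Nat) (hne : land ≠ [])
    (hm : (land.getD 0 []).length = m) (hm1 : 1 ≤ m) :
    solution_alt land = (finalRow m land).max?.getD 0 := by
  have hget0 : (PySem.List.pyGet? land 0).getD [] = land.getD 0 [] := by
    cases land with
    | nil => exact absurd rfl hne
    | cons a l => rw [PySem.List.pyGet?_zero]; rfl
  have hlen0 : PySem.List.len (land.getD 0 []) = (m : Int) := by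
    rw [PySem.List.len_eq, hm]
  simp only [solution_alt, hget0, hlen0]
  rw [PySem.List.slice_from_one, ← List.drop_one]
  have hgood := B3 m hm1 (land.drop 1) (land.getD 0 [])
    ((PySem.List.pyRange 1 (m : Int) 1).foldl (altFirst (land.getD 0 []))
      (PySem.List.pyGetD (land.getD 0 []) 0 0, 0, none))
    (B1 (land.getD 0 []) m hm hm1) hm
  exact good_value _ _ hgood


def entryA (land : List (List Int)) (m i : Nat) (j : Nat) : Int :=
  (land.getD i []).getD j 0 + exclMax (rowsA m land (i - 1)) j

def partA (land : List (List Int)) (m i t : Nat) : List Int :=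
  (List.range t).map (entryA land m i) ++ List.replicate (m - t) 0

def DkA (m : Nat) (land : List (List Int)) (k : Nat) : List (List Int) :=
  (List.range land.length).map (fun t => if t < k then rowsA m land t else List.replicate m 0)

theorem partA_set (land : List (List Int)) (m i t : Nat) (ht : t < m) :
    (partA land m i t).set t (entryA land m i t) = partA land m i (t + 1) := by
  apply List.ext_getElem
  · simp [partA]; omega
  · intro u h1 h2
    rw [List.getElem_set]
    by_cases hut : t = u
    · subst hut
      rw [if_pos rfl]
      simp only [partA]
      rw [List.getElem_append_left (by simp; all_goals omega)]
      simp
    · rw [if_neg hut]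
      have hum : u < m := by
        have := h1; simp [partA] at this; omega
      simp only [partA]
      rcases Nat.lt_or_ge u t with hu | hu
      · rw [List.getElem_append_left (by simp; all_goals omega),
          List.getElem_append_left (by simp; all_goals omega)]
        simp
      · have hu' : t < u := by omega
        rw [List.getElem_append_right (by simp; all_goals omega),
          List.getElem_append_right (by simp; all_goals omega)]
        simp

theorem DkA_get (m k t : Nat) (land : List (List Int)) (ht : t < land.length) :
    PySem.List.pyGetD (DkA m land k) (t : Int) []
      = if t < k then rowsA m land t else List.replicate m 0 := by
  rw [PySem.List.pyGetD_natCast, DkA, List.getD_eq_getElem _ _ (by simp; all_goals omega)]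
  simp

theorem innerA_zero (land : List (List Int)) (m i : Nat) (hin : i < land.length) :
    PySem.List.pySetD (DkA m land i) (i : Int) (partA land m i 0) = DkA m land i := by
  rw [show partA land m i 0 = List.replicate m 0 from by simp [partA]]
  rw [PySem.List.pySetD_natCast]
  have hrep : List.replicate m 0 = (DkA m land i)[i]'(by simp [DkA]; omega) := by
    simp [DkA]
  rw [hrep, List.set_getElem_self]

theorem innerA_step (land : List (List Int)) (m i t : Nat) (hi1 : 1 ≤ i)
    (hin : i < land.length) (hm0 : (land.getD 0 []).length = m) (ht : t < m) :
    aInner land (m : Int) (i : Int)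
      (PySem.List.pySetD (DkA m land i) (i : Int) (partA land m i t)) (t : Int)
      = PySem.List.pySetD (DkA m land i) (i : Int) (partA land m i (t + 1)) := by
  have hlenD : i < (DkA m land i).length := by simp [DkA]; omega
  have hprev : PySem.List.pyGetD
      (PySem.List.pySetD (DkA m land i) (i : Int) (partA land m i t)) ((i : Int) - 1) []
      = rowsA m land (i - 1) := by
    rw [show (i : Int) - 1 = ((i - 1 : Nat) : Int) from by omega]
    rw [PySem.List.pyGetD_pySetD_natCast _ _ _ _ _ hlenD, if_neg (by omega),
      DkA_get m i (i - 1) land (by omega), if_pos (by omega)]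
  have hcur : PySem.List.pyGetD
      (PySem.List.pySetD (DkA m land i) (i : Int) (partA land m i t)) (i : Int) []
      = partA land m i t := by
    rw [PySem.List.pyGetD_pySetD_natCast _ _ _ _ _ hlenD, if_pos rfl]
  simp only [aInner]
  rw [hprev, hcur]
  have hslice : PySem.List.slice (rowsA m land (i - 1)) (some 0) (some (t : Int)) ++
      PySem.List.slice (rowsA m land (i - 1)) (some ((t : Int) + 1)) (some (m : Int))
      = (rowsA m land (i - 1)).take t ++ (rowsA m land (i - 1)).drop (t + 1) := by
    congr 1
    · rw [PySem.List.slice_zero_start, PySem.List.slice_to_natCast]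
    · rw [show (t : Int) + 1 = ((t + 1 : Nat) : Int) from by push_cast; ring,
        PySem.List.slice_natCast]
      apply List.take_of_length_le
      rw [List.length_drop, rowsA_length m land hm0]
  rw [hslice, pymax_eq]
  rw [PySem.List.pyGetD_natCast land, PySem.List.pyGetD_natCast]
  simp only [PySem.List.pySetD_natCast, List.set_set]
  congr 1
  rw [show (land.getD i []).getD t 0 +
      (((rowsA m land (i - 1)).take t ++ (rowsA m land (i - 1)).drop (t + 1)).max?).getD 0
      = entryA land m i t from rfl]
  exact partA_set land m i t ht

theorem innerA (land : List (List Int)) (m i : Nat) (hi1 : 1 ≤ i) (hin : i < land.length)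
    (hm0 : (land.getD 0 []).length = m) :
    (PySem.List.pyRange 0 (m : Int) 1).foldl (aInner land (m : Int) (i : Int)) (DkA m land i)
      = DkA m land (i + 1) := by
  have hgen : ∀ t, t ≤ m →
      (PySem.List.pyRange 0 (t : Int) 1).foldl (aInner land (m : Int) (i : Int)) (DkA m land i)
        = PySem.List.pySetD (DkA m land i) (i : Int) (partA land m i t) := by
    intro t
    induction t with
    | zero =>
      intro _
      rw [show PySem.List.pyRange 0 ((0 : Nat) : Int) 1 = [] from rfl, List.foldl_nil]
      exact (innerA_zero land m i hin).symm
    | succ t ih =>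
      intro ht
      rw [show ((t + 1 : Nat) : Int) = (t : Int) + 1 from by push_cast; ring,
        PySem.List.pyRange_one_succ_right (by exact_mod_cast t.zero_le),
        List.foldl_concat, ih (by omega)]
      exact innerA_step land m i t hi1 hin hm0 (by omega)
  rw [hgen m le_rfl]
  have hfull : partA land m i m = stepRow m (rowsA m land (i - 1)) (land.getD i []) := by
    simp [partA, stepRow, entryA]
  have hrow : stepRow m (rowsA m land (i - 1)) (land.getD i []) = rowsA m land i := by
    have h := rowsA_succ m land (i - 1) (by omega)
    rw [show i - 1 + 1 = i from by omega] at h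
    exact h.symm
  rw [hfull, hrow, PySem.List.pySetD_natCast]
  apply List.ext_getElem
  · simp [DkA]
  · intro u h1 h2
    rw [List.getElem_set]
    by_cases hui : i = u
    · subst hui
      simp [DkA]
    · rw [if_neg hui]
      have hun : u < land.length := by simp [DkA] at h2; omega
      simp only [DkA, List.getElem_map, List.getElem_range]
      by_cases hu : u < i
      · rw [if_pos hu, if_pos (by omega)]
      · rw [if_neg hu, if_neg (by omega)]

theorem dpInit_eq (land : List (List Int)) (m : Nat) (hne : land ≠ [])
    (hm0 : (land.getD 0 []).length = m) :
    PySem.List.pySetD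
      ((PySem.List.pyRange 0 (land.length : Int) 1).map (fun _ => List.replicate m 0)) 0
      (land.getD 0 [])
      = DkA m land 1 := by
  have hn1 : 1 ≤ land.length := by
    cases land with
    | nil => exact absurd rfl hne
    | cons a l => exact Nat.succ_le_succ (Nat.zero_le _)
  rw [show (0 : Int) = ((0 : Nat) : Int) from rfl, PySem.List.pySetD_natCast]
  apply List.ext_getElem
  · simp [DkA, PySem.List.length_pyRange_one]
  · intro u h1 h2
    rw [List.getElem_set]
    by_cases hu : 0 = u
    · subst hu
      rw [if_pos rfl]
      simp [DkA, rowsA_zero]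
    · rw [if_neg hu]
      have hun : u < land.length := by simp [DkA] at h2; omega
      simp only [List.getElem_map, DkA, List.getElem_range]
      rw [if_neg (by omega)]
      simp

theorem outerA (land : List (List Int)) (m : Nat) (hm0 : (land.getD 0 []).length = m) :
    ∀ k : Nat, 1 ≤ k → k ≤ land.length →
    (PySem.List.pyRange 1 (k : Int) 1).foldl (aOuter land (m : Int)) (DkA m land 1)
      = DkA m land k := by
  intro k hk1
  induction k, hk1 using Nat.le_induction with
  | base =>
    intro _
    rw [show PySem.List.pyRange 1 ((1 : Nat) : Int) 1 = [] from rfl, List.foldl_nil]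
  | succ k hk ih =>
    intro hkn
    rw [show ((k + 1 : Nat) : Int) = (k : Int) + 1 from by push_cast; ring,
      PySem.List.pyRange_one_succ_right (by exact_mod_cast hk),
      List.foldl_concat, ih (by omega)]
    show aOuter land (m : Int) (DkA m land k) (k : Int) = DkA m land (k + 1)
    unfold aOuter
    exact innerA land m k hk (by omega) hm0

theorem A_chars (land : List (List Int)) (m : Nat) (hne : land ≠ [])
    (hm0 : (land.getD 0 []).length = m) :
    solution land = (finalRow m land).max?.getD 0 := by
  have hget0 : (PySem.List.pyGet? land 0).getD [] = land.getD 0 [] := by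
    cases land with
    | nil => exact absurd rfl hne
    | cons a l => rw [PySem.List.pyGet?_zero]; rfl
  have hlen0 : PySem.List.len (land.getD 0 []) = (m : Int) := by rw [PySem.List.len_eq, hm0]
  have hn1 : 1 ≤ land.length := by
    cases land with
    | nil => exact absurd rfl hne
    | cons a l => exact Nat.succ_le_succ (Nat.zero_le _)
  simp only [solution, hget0, hlen0, PySem.List.len_eq, Int.toNat_natCast]
  rw [dpInit_eq land m hne hm0, outerA land m hm0 land.length hn1 le_rfl]
  have hDne : DkA m land land.length ≠ [] := by
    have : (DkA m land land.length).length = land.length := by simp [DkA]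
    intro hnil
    rw [hnil] at this
    simp at this
    omega
  rw [PySem.List.pyGetD_neg_one _ _ hDne, List.getLast_eq_getElem, pymax_eq]
  have hlast : (DkA m land land.length)[(DkA m land land.length).length - 1]'(by
      refine Nat.sub_lt ?_ Nat.one_pos
      simpa using Nat.lt_of_lt_of_le Nat.zero_lt_one (by simpa [DkA] using hn1))
      = finalRow m land := by
    simp only [DkA, List.getElem_map, List.getElem_range, List.length_map, List.length_range]
    rw [if_pos (by omega)]
    exact (finalRow_eq_rowsA m land hne).symm
  rw [hlast]

-- ===== VERDICT (by name: the statement is the Claim_ definition above) =====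
theorem solution_spec : Claim_equal_solution := by
  intro land _hdom hpre
  obtain ⟨hne, hm1, _hrows, _hm2⟩ := hpre
  have hm0 : (land.getD 0 []).length = (land.headD []).length := by cases land <;> rfl
  unfold Spec_solution
  rw [A_chars land (land.headD []).length hne hm0,
    B_chars land (land.headD []).length hne hm0 hm1]
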